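-- pv_equiv track=rewrite | github.com/YSgogogo/Voting-game | voting/Voting_Block_One_individual_nochat/__init__.py | data_matches_pattern
-- ===== SOURCE A (Python) =====
-- def data_matches_pattern(data_slots, required_pattern):
--     """
--     Correct interpretation:
--     - required_pattern may contain up to 3 strings (e.g., ('rh', '', ''))
--     - Only non-empty tags in required_pattern need to be checked.
--     - If at least as many required tags as non-empty tags are found in data_slots, it's a match.
--     """
--     required_tags = [tag for tag in required_pattern if tag != '']
--     data_tags = [slot[1] for slot in data_slots]
--
--     # For each required tag, ensure at least one matching data_tag
--     for req_tag in required_tags: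
--         matched = False
--         for data_tag in data_tags:
--             if req_tag == data_tag or (len(req_tag) == 1 and data_tag.startswith(req_tag)):
--                 matched = True
--                 break  # move to the next required tag
--         if not matched:
--             return False
--     return True
-- ===== SOURCE B (Python) =====
-- def data_matches_pattern(data_slots, required_pattern):
--     # Reversed loop nesting: one pass over data_slots, maintaining the
--     # worklist of still-unmet required tags; each slot's tag knocks out
--     # every requirement it satisfies. Match iff the worklist empties.
--     unmet = [req for req in required_pattern if req != '']
--     for slot in data_slots:
--         if not unmet:
--             break
--         tag = slot[1]
--         unmet = [req for req in unmet
--                  if not (req == tag or (len(req) == 1 and tag.startswith(req)))]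
--     return not unmet
-- ===== Notes on version B (the rewrite author's own statement) =====
-- stated objective: alternative
-- what changed: Reverses the loop nesting: instead of scanning all data tags once per required tag, B makes a single pass over data_slots maintaining a shrinking worklist of unmet required tags (each tag filters out the requirements it satisfies, with early exit when the worklist empties) and succeeds iff the worklist is empty.
import Mathlib
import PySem

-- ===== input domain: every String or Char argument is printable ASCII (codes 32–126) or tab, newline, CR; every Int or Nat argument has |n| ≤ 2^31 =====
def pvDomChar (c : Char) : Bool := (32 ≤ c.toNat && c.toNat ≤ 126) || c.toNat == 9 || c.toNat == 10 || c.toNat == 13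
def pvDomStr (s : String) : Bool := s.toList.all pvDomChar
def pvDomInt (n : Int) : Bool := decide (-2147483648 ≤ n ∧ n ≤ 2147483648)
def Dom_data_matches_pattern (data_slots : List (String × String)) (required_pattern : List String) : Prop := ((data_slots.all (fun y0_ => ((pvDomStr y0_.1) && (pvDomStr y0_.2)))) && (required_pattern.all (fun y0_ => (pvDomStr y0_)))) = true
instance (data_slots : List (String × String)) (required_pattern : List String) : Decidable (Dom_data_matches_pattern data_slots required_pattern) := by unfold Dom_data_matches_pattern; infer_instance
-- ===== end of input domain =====

-- B reverses the loop nesting: one pass over data_slots maintains a shrinking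
-- worklist of still-unmet required tags (early exit when empty); objective: alternative.

-- ===== PORT A =====
-- inner 'for data_tag in data_tags: … break' loop of A
def pvLoopA (req : String) : List String → Bool
  | [] => false
  | t :: ts =>
    if req == t || (PySem.Str.len req == 1 && PySem.Str.startswith t req) then true
    else pvLoopA req ts

-- outer 'for req_tag in required_tags: … return False' loop of A
def pvOuterA (data_tags : List String) : List String → Bool
  | [] => true
  | r :: rs => if !(pvLoopA r data_tags) then false else pvOuterA data_tags rs

def data_matches_pattern (data_slots : List (String × String)) (required_pattern : List String) : Bool :=
  let required_tags := required_pattern.filter (fun tag => tag != "")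
  let data_tags := data_slots.map (fun slot => slot.2)
  pvOuterA data_tags required_tags

-- ===== PORT B =====
-- the per-slot knock-out condition of B's list comprehension
def pvMatchB (req tag : String) : Bool :=
  req == tag || (PySem.Str.len req == 1 && PySem.Str.startswith tag req)

-- 'for slot in data_slots: if not unmet: break; unmet = [req for req in unmet if …]'
def pvLoopB : List String → List (String × String) → List String
  | unmet, [] => unmet
  | unmet, slot :: rest =>
    if unmet.isEmpty then unmet
    else pvLoopB (unmet.filter (fun req => !pvMatchB req slot.2)) rest

def data_matches_pattern_alt (data_slots : List (String × String)) (required_pattern : List String) : Bool :=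
  let unmet := required_pattern.filter (fun req => req != "")
  (pvLoopB unmet data_slots).isEmpty

-- ===== PRECONDITION & SPEC =====
def Spec_data_matches_pattern (data_slots : List (String × String)) (required_pattern : List String) (out : Bool) : Prop := out = data_matches_pattern_alt data_slots required_pattern
instance (data_slots : List (String × String)) (required_pattern : List String) (out : Bool) : Decidable (Spec_data_matches_pattern data_slots required_pattern out) := by unfold Spec_data_matches_pattern; infer_instance

-- ===== CLAIM (what is proved, stated in full; the proofs are below) =====
def Claim_equal_data_matches_pattern : Prop := ∀ (data_slots : List (String × String)) (required_pattern : List String), Dom_data_matches_pattern data_slots required_pattern → Spec_data_matches_pattern data_slots required_pattern (data_matches_pattern data_slots required_pattern)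

-- ===== LEMMAS AND PROOFS =====

theorem pvLoopA_eq_any (req : String) (tags : List String) :
    pvLoopA req tags = tags.any (fun t => pvMatchB req t) := by
  induction tags with
  | nil => rfl
  | cons t ts ih =>
    simp only [pvLoopA, List.any_cons, ih, pvMatchB]
    cases h : (req == t || (PySem.Str.len req == 1 && PySem.Str.startswith t req)) <;> simp

theorem pvOuterA_eq_all (tags rs : List String) :
    pvOuterA tags rs = rs.all (fun r => pvLoopA r tags) := by
  induction rs with
  | nil => rfl
  | cons r rs ih =>
    simp only [pvOuterA, List.all_cons]
    split_ifs with h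
    · simp_all
    · simp_all

-- the early-exit worklist loop computes the filter by "matched by no slot"
theorem pvLoopB_eq_filter (slots : List (String × String)) (unmet : List String) :
    pvLoopB unmet slots =
      unmet.filter (fun req => !slots.any (fun s => pvMatchB req s.2)) := by
  induction slots generalizing unmet with
  | nil => simp [pvLoopB]
  | cons s rest ih =>
    simp only [pvLoopB]
    split_ifs with h
    · rw [List.isEmpty_iff] at h
      subst h; simp
    · rw [ih, List.filter_filter]
      refine List.filter_congr (fun req _ => ?_)
      simp only [List.any_cons, Bool.not_or]
      rw [Bool.and_comm]

theorem data_matches_pattern_spec : Claim_equal_data_matches_pattern := by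
  intro ds rp _
  unfold Spec_data_matches_pattern data_matches_pattern data_matches_pattern_alt
  simp only [pvOuterA_eq_all, pvLoopB_eq_filter, pvLoopA_eq_any]
  rw [Bool.eq_iff_iff, List.all_eq_true, List.isEmpty_iff, List.filter_eq_nil_iff]
  constructor
  · intro h req hreq
    simpa [List.any_map] using h req hreq
  · intro h req hreq
    simpa [List.any_map] using h req hreq
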